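-- pv_equiv track=rewrite | github.com/RaviTadakamalla/Chandrahoro2 | chandrahoro/backend/app/core/jaimini_chara_dasha.py | get_dasha_order
-- ===== SOURCE A (Python) =====
-- from typing import Dict, Any, List, Tuple
--
-- def get_dasha_order(lagna_sign: int, direction: str) -> List[int]:
--     """
--     Generate sequence of 12 signs starting from lagna.
--
--     Args:
--         lagna_sign: Lagna sign number (1-12)
--         direction: 'FORWARD' or 'BACKWARD'
--
--     Returns:
--         List of 12 sign numbers in dasha order
--     """
--     order = []
--     current = lagna_sign
--
--     for _ in range(12):
--         order.append(current)
--         if direction == 'FORWARD':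
--             current = (current % 12) + 1  # 1→2→...→12→1
--         else:  # BACKWARD
--             current = ((current - 2) % 12) + 1  # 1→12→11→...→2→1
--
--     return order
-- ===== SOURCE B (Python) =====
-- def get_dasha_order(lagna_sign: int, direction: str):
--     step = 1 if direction == 'FORWARD' else -1
--     return [lagna_sign] + [((lagna_sign - 1 + step * i) % 12) + 1 for i in range(1, 12)]
-- ===== Notes on version B (the rewrite author's own statement) =====
-- stated objective: simpler
-- what changed: Replaces the 12-step loop with a running `current` variable by a closed-form positional formula ((lagna_sign-1+step*i) % 12)+1 per index, so no state is carried between iterations; the first element is lagna_sign itself, exactly as A emits it.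
import Mathlib
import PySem

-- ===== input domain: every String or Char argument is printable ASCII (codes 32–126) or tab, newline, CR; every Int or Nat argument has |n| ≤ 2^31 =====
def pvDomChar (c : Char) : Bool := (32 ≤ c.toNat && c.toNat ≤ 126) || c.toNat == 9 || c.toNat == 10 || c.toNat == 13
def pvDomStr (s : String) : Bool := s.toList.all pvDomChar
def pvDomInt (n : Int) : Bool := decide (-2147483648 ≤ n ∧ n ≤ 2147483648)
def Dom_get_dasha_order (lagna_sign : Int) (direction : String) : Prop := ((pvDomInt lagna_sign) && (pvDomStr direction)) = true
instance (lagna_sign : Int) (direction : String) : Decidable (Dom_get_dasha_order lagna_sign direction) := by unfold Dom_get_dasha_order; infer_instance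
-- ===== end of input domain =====

-- B replaces A's running `current` state by a closed-form positional formula per index (objective: simpler).


-- ===== PORT A =====
def get_dasha_order (lagna_sign : Int) (direction : String) : List Int :=
  ((PySem.List.pyRange 0 12 1).foldl
    (fun (st : List Int × Int) _ =>
      let order := st.1 ++ [st.2]
      let current :=
        if direction == "FORWARD" then (PySem.Int.mod st.2 12) + 1
        else (PySem.Int.mod (st.2 - 2) 12) + 1
      (order, current))
    ([], lagna_sign)).1

-- ===== PORT B =====
def get_dasha_order_alt (lagna_sign : Int) (direction : String) : List Int :=
  let step : Int := if direction == "FORWARD" then 1 else -1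
  [lagna_sign] ++ (PySem.List.pyRange 1 12 1).map
    (fun i => (PySem.Int.mod (lagna_sign - 1 + step * i) 12) + 1)

-- ===== PRECONDITION & SPEC =====
def Spec_get_dasha_order (lagna_sign : Int) (direction : String) (out : List Int) : Prop := out = get_dasha_order_alt lagna_sign direction
instance (lagna_sign : Int) (direction : String) (out : List Int) : Decidable (Spec_get_dasha_order lagna_sign direction out) := by unfold Spec_get_dasha_order; infer_instance

-- ===== CLAIM (what is proved, stated in full; the proofs are below) =====
def Claim_equal_get_dasha_order : Prop := ∀ (lagna_sign : Int) (direction : String), Dom_get_dasha_order lagna_sign direction → Spec_get_dasha_order lagna_sign direction (get_dasha_order lagna_sign direction)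

-- ===== LEMMAS AND PROOFS =====
theorem pyRange_0_12 : PySem.List.pyRange 0 12 1 = [0,1,2,3,4,5,6,7,8,9,10,11] := by decide

theorem pyRange_1_12 : PySem.List.pyRange 1 12 1 = [1,2,3,4,5,6,7,8,9,10,11] := by decide

theorem pymod12_eq_emod (a : Int) : PySem.Int.mod a 12 = a % 12 :=
  PySem.Int.mod_eq_emod_of_pos (by norm_num)

-- ===== VERDICT (by name: the statement is the Claim_ definition above) =====
theorem get_dasha_order_spec : Claim_equal_get_dasha_order := by
  intro L d _
  unfold Spec_get_dasha_order get_dasha_order get_dasha_order_alt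
  rw [pyRange_0_12, pyRange_1_12]
  by_cases h : d == "FORWARD" <;>
    simp only [h, if_pos, if_neg, Bool.false_eq_true, not_false_iff, List.foldl,
      List.map, List.cons_append, List.nil_append,
      List.cons.injEq, one_mul, neg_mul, pymod12_eq_emod, true_and, and_true] <;>
    omega
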